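-- pv_equiv track=rewrite | github.com/banteg/crimson | src/crimson/original/divergence_report.py | _port_paths_for_native_functions
-- ===== SOURCE A (Python) =====
-- NATIVE_FUNCTION_TO_PORT_PATHS: dict[str, tuple[str, ...]] = {
--     "creature_update_all": (
--         "src/crimson/creatures/runtime.py",
--         "src/crimson/creatures/ai.py",
--     ),
--     "creature_apply_damage": (
--         "src/crimson/creatures/damage.py",
--         "src/crimson/creatures/runtime.py",
--     ),
--     "creature_find_in_radius": (
--         "src/crimson/projectiles.py",
--         "src/crimson/creatures/runtime.py",
--     ),
--     "creature_handle_death": ("src/crimson/creatures/runtime.py",),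
--     "projectile_update": (
--         "src/crimson/projectiles.py",
--         "src/crimson/sim/world_state.py",
--     ),
--     "player_update": (
--         "src/crimson/gameplay.py",
--         "src/crimson/weapons.py",
--         "src/crimson/player_damage.py",
--     ),
--     "bonus_try_spawn_on_kill": (
--         "src/crimson/bonuses/pool.py",
--         "src/crimson/creatures/runtime.py",
--     ),
--     "fx_queue_add_random": (
--         "src/crimson/effects.py",
--         "src/crimson/sim/presentation_step.py",
--     ),
--     "fx_spawn_sprite": (
--         "src/crimson/effects.py",
--         "src/crimson/views/projectile_fx.py",
--     ),
--     "effect_spawn_blood_splatter": (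
--         "src/crimson/effects.py",
--         "src/crimson/sim/presentation_step.py",
--         "src/crimson/bonuses/fire_bullets.py",
--     ),
-- }
--
-- def _port_paths_for_native_functions(function_names: list[str] | tuple[str, ...]) -> tuple[str, ...]:
--     out: list[str] = []
--     seen: set[str] = set()
--     for name in function_names:
--         for path in NATIVE_FUNCTION_TO_PORT_PATHS.get(str(name), ()):
--             if path in seen:
--                 continue
--             seen.add(path)
--             out.append(path)
--     return tuple(out)
-- ===== SOURCE B (Python) =====
-- NATIVE_FUNCTION_TO_PORT_PATHS: dict[str, tuple[str, ...]] = {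
--     "creature_update_all": (
--         "src/crimson/creatures/runtime.py",
--         "src/crimson/creatures/ai.py",
--     ),
--     "creature_apply_damage": (
--         "src/crimson/creatures/damage.py",
--         "src/crimson/creatures/runtime.py",
--     ),
--     "creature_find_in_radius": (
--         "src/crimson/projectiles.py",
--         "src/crimson/creatures/runtime.py",
--     ),
--     "creature_handle_death": ("src/crimson/creatures/runtime.py",),
--     "projectile_update": (
--         "src/crimson/projectiles.py",
--         "src/crimson/sim/world_state.py",
--     ),
--     "player_update": (
--         "src/crimson/gameplay.py",
--         "src/crimson/weapons.py",
--         "src/crimson/player_damage.py",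
--     ),
--     "bonus_try_spawn_on_kill": (
--         "src/crimson/bonuses/pool.py",
--         "src/crimson/creatures/runtime.py",
--     ),
--     "fx_queue_add_random": (
--         "src/crimson/effects.py",
--         "src/crimson/sim/presentation_step.py",
--     ),
--     "fx_spawn_sprite": (
--         "src/crimson/effects.py",
--         "src/crimson/views/projectile_fx.py",
--     ),
--     "effect_spawn_blood_splatter": (
--         "src/crimson/effects.py",
--         "src/crimson/sim/presentation_step.py",
--         "src/crimson/bonuses/fire_bullets.py",
--     ),
-- }
--
--
-- def _dedup_keep_first(paths: list[str]) -> list[str]: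
--     # keep the head, delete every later copy of it, recurse on the remainder
--     if not paths:
--         return []
--     head = paths[0]
--     return [head] + _dedup_keep_first([p for p in paths[1:] if p != head])
--
--
-- def _port_paths_for_native_functions(function_names: list[str] | tuple[str, ...]) -> tuple[str, ...]:
--     flat = [
--         path
--         for name in function_names
--         for path in NATIVE_FUNCTION_TO_PORT_PATHS.get(str(name), ())
--     ]
--     return tuple(_dedup_keep_first(flat))
-- ===== Notes on version B (the rewrite author's own statement) =====
-- stated objective: alternative
-- what changed: B stages the work: it first flattens all mapped paths into one list, then deduplicates by a recursive keep-head-and-delete-its-later-copies pass, so no seen-set or membership branch is maintained during traversal.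
import Mathlib
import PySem

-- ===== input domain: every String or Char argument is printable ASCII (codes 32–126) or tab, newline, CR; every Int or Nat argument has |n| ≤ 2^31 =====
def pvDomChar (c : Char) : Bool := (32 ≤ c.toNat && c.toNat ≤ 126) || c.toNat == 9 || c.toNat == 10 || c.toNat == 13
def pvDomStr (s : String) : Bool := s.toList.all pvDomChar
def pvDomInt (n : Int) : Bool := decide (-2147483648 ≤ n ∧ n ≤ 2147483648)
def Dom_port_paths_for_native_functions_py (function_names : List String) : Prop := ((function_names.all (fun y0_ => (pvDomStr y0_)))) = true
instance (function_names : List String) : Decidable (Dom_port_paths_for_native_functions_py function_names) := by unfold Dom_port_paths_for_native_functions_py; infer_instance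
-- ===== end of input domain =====

-- B stages the work (flatten all mapped paths, then a recursive keep-head/delete-later-copies dedup) instead of A's single pass with a seen-set; alternative decomposition, same results.


-- ===== PORT A =====
-- the module constant NATIVE_FUNCTION_TO_PORT_PATHS (shared by both Pythons)
def pvNativeTable : PySem.Dict String (List String) := PySem.Dict.ofList
  [ ("creature_update_all", ["src/crimson/creatures/runtime.py", "src/crimson/creatures/ai.py"]),
    ("creature_apply_damage", ["src/crimson/creatures/damage.py", "src/crimson/creatures/runtime.py"]),
    ("creature_find_in_radius", ["src/crimson/projectiles.py", "src/crimson/creatures/runtime.py"]),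
    ("creature_handle_death", ["src/crimson/creatures/runtime.py"]),
    ("projectile_update", ["src/crimson/projectiles.py", "src/crimson/sim/world_state.py"]),
    ("player_update", ["src/crimson/gameplay.py", "src/crimson/weapons.py", "src/crimson/player_damage.py"]),
    ("bonus_try_spawn_on_kill", ["src/crimson/bonuses/pool.py", "src/crimson/creatures/runtime.py"]),
    ("fx_queue_add_random", ["src/crimson/effects.py", "src/crimson/sim/presentation_step.py"]),
    ("fx_spawn_sprite", ["src/crimson/effects.py", "src/crimson/views/projectile_fx.py"]),
    ("effect_spawn_blood_splatter", ["src/crimson/effects.py", "src/crimson/sim/presentation_step.py", "src/crimson/bonuses/fire_bullets.py"]) ]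

-- the body of A's inner loop: 'if path in seen: continue; seen.add(path); out.append(path)'
def pvStepA (acc : List String × PySem.Set String) (path : String) : List String × PySem.Set String :=
  if PySem.Set.contains acc.2 path then acc else (acc.1 ++ [path], PySem.Set.add acc.2 path)

def port_paths_for_native_functions_py (function_names : List String) : List String :=
  let r := function_names.foldl
    (fun acc name => (PySem.Dict.getD pvNativeTable name []).foldl pvStepA acc)
    ([], PySem.Set.empty)
  r.1

-- ===== PORT B =====
-- B's helper _dedup_keep_first: keep the head, delete its later copies, recurse
def pvDedupKeepFirst : List String → List String
  | [] => []
  | h :: t => h :: pvDedupKeepFirst (t.filter (fun p => !(p == h)))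
termination_by xs => xs.length
decreasing_by
  have hle := List.length_filter_le (fun (x : {x // x ∈ t}) => !((x : String) == h)) t.attach
  simp only [List.length_attach] at hle
  simpa using Nat.lt_succ_of_le hle

def port_paths_for_native_functions_py_alt (function_names : List String) : List String :=
  pvDedupKeepFirst (function_names.flatMap (fun name => PySem.Dict.getD pvNativeTable name []))

-- ===== PRECONDITION & SPEC =====
def Spec_port_paths_for_native_functions_py (function_names : List String) (out : List String) : Prop := out = port_paths_for_native_functions_py_alt function_names
instance (function_names : List String) (out : List String) : Decidable (Spec_port_paths_for_native_functions_py function_names out) := by unfold Spec_port_paths_for_native_functions_py; infer_instance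

-- ===== CLAIM (what is proved, stated in full; the proofs are below) =====
def Claim_equal_port_paths_for_native_functions_py : Prop := ∀ (function_names : List String), Dom_port_paths_for_native_functions_py function_names → Spec_port_paths_for_native_functions_py function_names (port_paths_for_native_functions_py function_names)

-- ===== LEMMAS AND PROOFS =====

-- invariant of A's inner loop: from a diagonal state out = seen, one step keeps both equal to Set.add
theorem pvStepA_diag (s : PySem.Set String) (p : String) :
    pvStepA (s, s) p = (PySem.Set.add s p, PySem.Set.add s p) := by
  simp only [pvStepA, PySem.Set.add]
  split <;> simp_all

-- A's inner loop from a diagonal state is Set-folding on both components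
theorem foldl_stepA_diag (paths : List String) (s : PySem.Set String) :
    paths.foldl pvStepA (s, s) = (paths.foldl PySem.Set.add s, paths.foldl PySem.Set.add s) := by
  induction paths generalizing s with
  | nil => rfl
  | cons p t ih => simp [List.foldl_cons, pvStepA_diag, ih]

-- A's outer loop from a diagonal state stays diagonal, folding Set.add over each name's paths
theorem foldl_outer_diag (fns : List String) (s : PySem.Set String) :
    fns.foldl (fun acc name => (PySem.Dict.getD pvNativeTable name []).foldl pvStepA acc) (s, s)
      = (fns.foldl (fun a name => (PySem.Dict.getD pvNativeTable name []).foldl PySem.Set.add a) s,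
         fns.foldl (fun a name => (PySem.Dict.getD pvNativeTable name []).foldl PySem.Set.add a) s) := by
  induction fns generalizing s with
  | nil => rfl
  | cons n t ih => simp [List.foldl_cons, foldl_stepA_diag, ih]

-- folding Set.add over a flatMap is the nested fold
theorem foldl_add_flatMap (f : String → List String) (xs : List String) (s : PySem.Set String) :
    (xs.flatMap f).foldl PySem.Set.add s = xs.foldl (fun a n => (f n).foldl PySem.Set.add a) s := by
  induction xs generalizing s with
  | nil => rfl
  | cons h t ih => simp [List.flatMap_cons, List.foldl_append, ih]

-- Set.ofList commutes with filter
theorem ofList_filter (p : String → Bool) (xs : List String) :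
    PySem.Set.ofList (xs.filter p) = (PySem.Set.ofList xs).filter p := by
  induction xs with
  | nil => rfl
  | cons h t ih =>
    rw [PySem.Set.ofList_cons]
    by_cases hp : p h = true
    · rw [List.filter_cons_of_pos hp, PySem.Set.ofList_cons, ih,
          List.filter_cons_of_pos hp]
      simp [PySem.Set.discard, List.filter_filter, Bool.and_comm]
    · rw [List.filter_cons_of_neg (by simp [hp]), ih,
          List.filter_cons_of_neg (by simp [hp])]
      simp only [PySem.Set.discard, List.filter_filter]
      apply List.filter_congr
      intro x _
      by_cases hx : x = h <;> simp [hx, hp]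

-- B's recursive dedup computes PySem.Set.ofList (first occurrences in order)
theorem pvDedupKeepFirst_eq_ofList (xs : List String) :
    pvDedupKeepFirst xs = PySem.Set.ofList xs := by
  have key : ∀ (n : Nat) (xs : List String), xs.length ≤ n →
      pvDedupKeepFirst xs = PySem.Set.ofList xs := by
    intro n
    induction n with
    | zero =>
      intro xs hx
      rw [List.length_eq_zero_iff.mp (Nat.le_zero.mp hx)]
      simp [pvDedupKeepFirst]
    | succ m ih =>
      intro xs hx
      match xs with
      | [] => simp [pvDedupKeepFirst]
      | h :: t =>
        rw [pvDedupKeepFirst, ih _ (Nat.le_trans (List.length_filter_le _ _)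
              (Nat.le_of_succ_le_succ hx)),
            PySem.Set.ofList_cons, ofList_filter]
        rfl
  exact key xs.length xs (Nat.le_refl _)

-- ===== VERDICT (by name: the statement is the Claim_ definition above) =====
theorem port_paths_for_native_functions_py_spec : Claim_equal_port_paths_for_native_functions_py := by
  intro fns _
  show port_paths_for_native_functions_py fns = port_paths_for_native_functions_py_alt fns
  simp only [port_paths_for_native_functions_py, port_paths_for_native_functions_py_alt,
    pvDedupKeepFirst_eq_ofList, PySem.Set.ofList_eq_foldl, foldl_add_flatMap]
  rw [show (PySem.Set.empty : PySem.Set String) = ([] : List String) from rfl] at *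
  rw [foldl_outer_diag]
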